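-- pv_equiv track=rewrite | github.com/our-study/able_coding_master | DaekyungLa/중급/74.py | bfs
-- ===== SOURCE A (Python) =====
-- from collections import deque
--
-- def bfs(x, y, grid, visited, directions):
--     queue = deque([(x, y)])
--     visited[x][y] = True
--     cells = [(x, y)]
--     color_count = {'A': 0, 'B': 0}
--     while queue:
--         cx, cy = queue.popleft()
--         if grid[cx][cy] in color_count:
--             color_count[grid[cx][cy]] += 1
--         for dx, dy in directions:
--             nx, ny = cx + dx, cy + dy
--             if 0 <= nx < len(grid) and 0 <= ny < len(grid[0]) and not visited[nx][ny] and grid[nx][ny] != 'X':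
--                 visited[nx][ny] = True
--                 queue.append((nx, ny))
--                 cells.append((nx, ny))
--     return cells, color_count
-- ===== SOURCE B (Python) =====
-- def bfs(x, y, grid, visited, directions):
--     # Level-synchronous (frontier-based) BFS instead of a deque; colors are
--     # tallied afterwards from the collected cells instead of during traversal.
--     # `visited` is mutated the same way as in the original.
--     visited[x][y] = True
--     cells = [(x, y)]
--     frontier = [(x, y)]
--     while frontier:
--         nxt = []
--         for cx, cy in frontier:
--             for dx, dy in directions:
--                 nx, ny = cx + dx, cy + dy
--                 if 0 <= nx < len(grid) and 0 <= ny < len(grid[0]) and not visited[nx][ny] and grid[nx][ny] != 'X':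
--                     visited[nx][ny] = True
--                     nxt.append((nx, ny))
--         cells.extend(nxt)
--         frontier = nxt
--     colors = [grid[i][j] for i, j in cells]
--     tally = {}
--     for c in colors:
--         tally[c] = tally.get(c, 0) + 1
--     return cells, {'A': tally.get('A', 0), 'B': tally.get('B', 0)}
-- ===== Notes on version B (the rewrite author's own statement) =====
-- stated objective: alternative
-- what changed: The deque-driven BFS with counting interleaved into the traversal is replaced by a level-synchronous BFS (a whole frontier list is expanded into the next frontier per outer iteration, no queue), followed by two staged passes: extract the colors of the collected cells and tally them into a dict, reading off the 'A'/'B' counts at the end.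
import Mathlib
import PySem

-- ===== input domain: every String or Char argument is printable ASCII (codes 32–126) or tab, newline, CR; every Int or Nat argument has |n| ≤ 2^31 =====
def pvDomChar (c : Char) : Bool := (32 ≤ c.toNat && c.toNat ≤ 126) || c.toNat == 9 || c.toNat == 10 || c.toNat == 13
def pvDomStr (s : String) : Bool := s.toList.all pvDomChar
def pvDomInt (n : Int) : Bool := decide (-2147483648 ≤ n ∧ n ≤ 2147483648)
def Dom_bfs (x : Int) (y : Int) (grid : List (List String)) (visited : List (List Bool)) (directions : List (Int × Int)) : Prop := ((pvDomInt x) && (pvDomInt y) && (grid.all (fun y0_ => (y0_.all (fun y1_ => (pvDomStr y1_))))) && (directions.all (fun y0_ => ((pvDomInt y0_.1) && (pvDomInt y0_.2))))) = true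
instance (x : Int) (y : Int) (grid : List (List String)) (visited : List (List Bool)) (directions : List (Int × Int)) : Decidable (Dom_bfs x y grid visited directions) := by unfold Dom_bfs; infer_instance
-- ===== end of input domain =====

-- B replaces the deque BFS with interleaved counting by a level-synchronous BFS (whole frontiers
-- expanded into the next frontier, no queue) followed by a separate color-tally pass over the
-- collected cells; both mutate `visited` identically in Python, and the equivalence proved here is
-- about the return value.

-- shared 2-D accessors (the Python index expressions, via PySem)
def get2S (grid : List (List String)) (i j : Int) : String :=
  PySem.List.pyGetD (PySem.List.pyGetD grid i []) j ""
def get2B (v : List (List Bool)) (i j : Int) : Bool :=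
  PySem.List.pyGetD (PySem.List.pyGetD v i []) j false
def set2 (v : List (List Bool)) (i j : Int) (b : Bool) : List (List Bool) :=
  PySem.List.pySetD v i (PySem.List.pySetD (PySem.List.pyGetD v i []) j b)
def gridW (grid : List (List String)) : Nat := (PySem.List.pyGetD grid 0 []).length
-- the neighbour guard `0 <= nx < len(grid) and 0 <= ny < len(grid[0]) and not visited[nx][ny] and grid[nx][ny] != 'X'`
def okCell (grid : List (List String)) (vis : List (List Bool)) (nx ny : Int) : Bool :=
  decide (0 ≤ nx) && decide (nx < (grid.length : Int)) &&
  decide (0 ≤ ny) && decide (ny < (gridW grid : Int)) &&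
  !(get2B vis nx ny) && (get2S grid nx ny != "X")
-- fuel: enough iterations for any BFS from this `visited` (each step consumes at least one False)
def countFalse (v : List (List Bool)) : Nat := (v.map (fun r => r.count false)).sum

-- ===== PORT A =====
-- `if grid[cx][cy] in color_count: color_count[grid[cx][cy]] += 1`
def cnt (grid : List (List String)) (colors : PySem.Dict String Int) (p : Int × Int) : PySem.Dict String Int :=
  if colors.contains (get2S grid p.1 p.2) then colors.modify (get2S grid p.1 p.2) 0 (· + 1)
  else colors
-- the body of A's inner `for dx, dy in directions` loop; state = (queue, visited, cells)
def stepA (grid : List (List String)) (cx cy : Int)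
    (st : List (Int × Int) × List (List Bool) × List (Int × Int)) (d : Int × Int) :
    List (Int × Int) × List (List Bool) × List (Int × Int) :=
  let nx := cx + d.1
  let ny := cy + d.2
  if okCell grid st.2.1 nx ny then
    (st.1 ++ [(nx, ny)], set2 st.2.1 nx ny true, st.2.2 ++ [(nx, ny)])
  else st
-- A's `while queue` loop (fuel only makes it total; the proof shows the fuel used is sufficient)
def bfsLoop (grid : List (List String)) (directions : List (Int × Int)) :
    Nat → List (Int × Int) → List (List Bool) → List (Int × Int) → PySem.Dict String Int →
    (List (Int × Int)) × PySem.Dict String Int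
  | 0, _, _, cells, colors => (cells, colors)
  | _ + 1, [], _, cells, colors => (cells, colors)
  | f + 1, (cx, cy) :: rest, vis, cells, colors =>
      bfsLoop grid directions f
        (directions.foldl (stepA grid cx cy) (rest, vis, cells)).1
        (directions.foldl (stepA grid cx cy) (rest, vis, cells)).2.1
        (directions.foldl (stepA grid cx cy) (rest, vis, cells)).2.2
        (cnt grid colors (cx, cy))

def bfs (x : Int) (y : Int) (grid : List (List String)) (visited : List (List Bool)) (directions : List (Int × Int)) : (List (Int × Int)) × (List (String × Int)) :=
  ((bfsLoop grid directions (2 * countFalse (set2 visited x y true) + 2) [(x, y)]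
      (set2 visited x y true) [(x, y)] (PySem.Dict.ofList [("A", 0), ("B", 0)])).1,
   (bfsLoop grid directions (2 * countFalse (set2 visited x y true) + 2) [(x, y)]
      (set2 visited x y true) [(x, y)] (PySem.Dict.ofList [("A", 0), ("B", 0)])).2.items)

-- ===== PORT B =====
-- the body of B's inner loop; state = (nxt, visited)
def stepB (grid : List (List String)) (cx cy : Int)
    (st : List (Int × Int) × List (List Bool)) (d : Int × Int) :
    List (Int × Int) × List (List Bool) :=
  let nx := cx + d.1
  let ny := cy + d.2
  if okCell grid st.2 nx ny then (st.1 ++ [(nx, ny)], set2 st.2 nx ny true) else st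
-- B's `for cx, cy in frontier: for dx, dy in directions: …` (one level's expansion)
def levelFold (grid : List (List String)) (directions : List (Int × Int))
    (frontier : List (Int × Int)) (st : List (Int × Int) × List (List Bool)) :
    List (Int × Int) × List (List Bool) :=
  frontier.foldl (fun st c => directions.foldl (stepB grid c.1 c.2) st) st
-- B's `while frontier:` loop (fuel only makes it total)
def levelLoop (grid : List (List String)) (directions : List (Int × Int)) :
    Nat → List (Int × Int) → List (List Bool) → List (Int × Int) → List (Int × Int)
  | 0, _, _, cells => cells
  | f + 1, frontier, vis, cells =>
      if frontier = [] then cells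
      else
        levelLoop grid directions f
          (levelFold grid directions frontier ([], vis)).1
          (levelFold grid directions frontier ([], vis)).2
          (cells ++ (levelFold grid directions frontier ([], vis)).1)

def bfs_alt (x : Int) (y : Int) (grid : List (List String)) (visited : List (List Bool)) (directions : List (Int × Int)) : (List (Int × Int)) × (List (String × Int)) :=
  let cells := levelLoop grid directions (countFalse (set2 visited x y true) + 2)
      [(x, y)] (set2 visited x y true) [(x, y)]
  let colors := cells.map (fun p => get2S grid p.1 p.2)
  -- `tally[c] = tally.get(c, 0) + 1` is Dict.modify c 0 (· + 1)
  let tally := colors.foldl (fun d c => d.modify c 0 (· + 1)) PySem.Dict.empty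
  (cells, [("A", tally.getD "A" 0), ("B", tally.getD "B" 0)])

-- ===== PRECONDITION & SPEC =====
-- Pre_ admits exactly the shapes on which every index A can touch is in range: a (possibly
-- negatively wrapped) valid start in both grid and visited, visited at least grid-sized, and all
-- rows at least len(grid[0]) wide; outside it A can raise IndexError, and the inputs it excludes on
-- which A still returns (a short row or short visited the BFS happens not to reach) depend on
-- reachability, which a closed-form precondition cannot express.
def Pre_bfs (x : Int) (y : Int) (grid : List (List String)) (visited : List (List Bool)) (directions : List (Int × Int)) : Prop :=
  grid.length ≤ visited.length ∧
  (∀ k < grid.length, gridW grid ≤ ((visited[k]?).getD []).length) ∧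
  (∀ r ∈ grid, gridW grid ≤ r.length) ∧
  PySem.Raise.InRange visited.length x ∧
  PySem.Raise.InRange (PySem.List.pyGetD visited x []).length y ∧
  PySem.Raise.InRange grid.length x ∧
  PySem.Raise.InRange (PySem.List.pyGetD grid x []).length y
instance (x : Int) (y : Int) (grid : List (List String)) (visited : List (List Bool)) (directions : List (Int × Int)) : Decidable (Pre_bfs x y grid visited directions) := by unfold Pre_bfs; infer_instance
def pvWitness_bfs : Int × Int × List (List String) × List (List Bool) × (List (Int × Int)) :=
  (0, 0, [["A"]], [[false]], [(0, 1)])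
def Spec_bfs (x : Int) (y : Int) (grid : List (List String)) (visited : List (List Bool)) (directions : List (Int × Int)) (out : (List (Int × Int)) × (List (String × Int))) : Prop := out = bfs_alt x y grid visited directions
instance (x : Int) (y : Int) (grid : List (List String)) (visited : List (List Bool)) (directions : List (Int × Int)) (out : (List (Int × Int)) × (List (String × Int))) : Decidable (Spec_bfs x y grid visited directions out) := by unfold Spec_bfs; infer_instance

-- ===== CLAIM (what is proved, stated in full; the proofs are below) =====
def Claim_equal_bfs : Prop := ∀ (x : Int) (y : Int) (grid : List (List String)) (visited : List (List Bool)) (directions : List (Int × Int)), Dom_bfs x y grid visited directions → Pre_bfs x y grid visited directions → Spec_bfs x y grid visited directions (bfs x y grid visited directions)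

-- ===== LEMMAS AND PROOFS =====
def VisShape (grid : List (List String)) (v : List (List Bool)) : Prop :=
  grid.length ≤ v.length ∧ ∀ k < grid.length, gridW grid ≤ ((v[k]?).getD []).length

theorem pySetD_cases {α : Type} (xs : List α) (i : Int) (w : α) (d : α) :
    PySem.List.pySetD xs i w = xs ∨
    ∃ k, ∃ _h : k < xs.length, PySem.List.pySetD xs i w = xs.set k w ∧
      PySem.List.pyGetD xs i d = xs[k] := by
  cases h : PySem.List.pyIdx? xs.length i with
  | none => left; simp [PySem.List.pySetD, PySem.List.pySet?, h]
  | some k =>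
    right
    have hk : k < xs.length := by
      simp only [PySem.List.pyIdx?] at h
      split_ifs at h with h1 h2 h3 <;> simp_all <;> omega
    refine ⟨k, hk, ?_, ?_⟩
    · simp [PySem.List.pySetD, PySem.List.pySet?, h]
    · simp [PySem.List.pyGetD, PySem.List.pyGet?, h, List.getElem?_eq_getElem hk]

theorem stepA_pos (grid : List (List String)) (cx cy : Int)
    (st : List (Int × Int) × List (List Bool) × List (Int × Int)) (d : Int × Int)
    (h : okCell grid st.2.1 (cx + d.1) (cy + d.2) = true) :
    stepA grid cx cy st d =
      (st.1 ++ [(cx + d.1, cy + d.2)], set2 st.2.1 (cx + d.1) (cy + d.2) true,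
       st.2.2 ++ [(cx + d.1, cy + d.2)]) := by
  unfold stepA; simp [h]

theorem stepA_neg (grid : List (List String)) (cx cy : Int)
    (st : List (Int × Int) × List (List Bool) × List (Int × Int)) (d : Int × Int)
    (h : ¬ okCell grid st.2.1 (cx + d.1) (cy + d.2) = true) :
    stepA grid cx cy st d = st := by
  unfold stepA; rw [Bool.not_eq_true] at h; simp [h]

theorem stepB_pos (grid : List (List String)) (cx cy : Int)
    (st : List (Int × Int) × List (List Bool)) (d : Int × Int)
    (h : okCell grid st.2 (cx + d.1) (cy + d.2) = true) :
    stepB grid cx cy st d =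
      (st.1 ++ [(cx + d.1, cy + d.2)], set2 st.2 (cx + d.1) (cy + d.2) true) := by
  unfold stepB; simp [h]

theorem stepB_neg (grid : List (List String)) (cx cy : Int)
    (st : List (Int × Int) × List (List Bool)) (d : Int × Int)
    (h : ¬ okCell grid st.2 (cx + d.1) (cy + d.2) = true) :
    stepB grid cx cy st d = st := by
  unfold stepB; rw [Bool.not_eq_true] at h; simp [h]

theorem sum_set (l : List Nat) : ∀ (n : Nat) (hn : n < l.length) (a : Nat),
    (l.set n a).sum + l[n] = l.sum + a := by
  induction l with
  | nil => simp
  | cons x t ih =>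
    intro n hn a
    cases n with
    | zero => simp; omega
    | succ m =>
      have := ih m (by simpa using hn) a
      simp only [List.set, List.sum_cons, List.getElem_cons_succ]
      omega

theorem count_false_set (r : List Bool) : ∀ (m : Nat) (hm : m < r.length), r[m] = false →
    (r.set m true).count false + 1 = r.count false := by
  induction r with
  | nil => simp
  | cons x t ih =>
    intro m hm hf
    cases m with
    | zero => simp only [List.getElem_cons_zero] at hf; subst hf; simp
    | succ m =>
      have := ih m (by simpa using hm) (by simpa using hf)
      simp only [List.set, List.count_cons]
      omega

theorem cf_set2 (v : List (List Bool)) (i j : Int) (hi0 : 0 ≤ i) (hi : i.toNat < v.length)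
    (hj0 : 0 ≤ j) (hj : j.toNat < (v[i.toNat]).length) (hf : get2B v i j = false) :
    countFalse (set2 v i j true) + 1 = countFalse v := by
  have hiI : i < (v.length : Int) := by omega
  have hjI : j < ((v[i.toNat]).length : Int) := by omega
  unfold get2B at hf
  rw [PySem.List.pyGetD_eq_getElem _ _ hi0 hiI, PySem.List.pyGetD_eq_getElem _ _ hj0 hjI] at hf
  unfold set2 countFalse
  rw [PySem.List.pyGetD_eq_getElem _ _ hi0 hiI, PySem.List.pySetD_of_nonneg _ _ hj0,
    PySem.List.pySetD_of_nonneg _ _ hi0, List.map_set]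
  have h1 := sum_set (v.map (fun r => r.count false)) i.toNat (by simpa using hi)
      (((v[i.toNat]).set j.toNat true).count false)
  have h2 := count_false_set (v[i.toNat]) j.toNat hj hf
  simp only [List.getElem_map] at h1
  omega

theorem shape_set2 (grid : List (List String)) (v : List (List Bool)) (i j : Int)
    (hs : VisShape grid v) :
    VisShape grid (set2 v i j true) := by
  unfold set2
  rcases pySetD_cases v i (PySem.List.pySetD (PySem.List.pyGetD v i []) j true)
      ([] : List Bool) with h | ⟨k, hk, hset, hget⟩
  · rw [h]; exact hs
  · rw [hset]
    refine ⟨by simpa using hs.1, ?_⟩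
    intro m hm
    by_cases hmk : m = k
    · subst hmk
      rw [List.getElem?_set_self]
      simp only [Option.getD_some]
      rw [hget, PySem.List.length_pySetD]
      have := hs.2 m hm
      rwa [List.getElem?_eq_getElem hk, Option.getD_some] at this
      exact hk
    · rw [List.getElem?_set_ne (by omega)]
      exact hs.2 m hm

theorem okCell_iff (grid : List (List String)) (vis : List (List Bool)) (nx ny : Int) :
    okCell grid vis nx ny = true ↔
      0 ≤ nx ∧ nx < (grid.length : Int) ∧ 0 ≤ ny ∧ ny < (gridW grid : Int) ∧
      get2B vis nx ny = false ∧ get2S grid nx ny ≠ "X" := by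
  unfold okCell
  simp [and_assoc]

-- the appended elements and final visited of a direction fold do not depend on the cells prefix
theorem foldB_shift (grid : List (List String)) (cx cy : Int) (ds : List (Int × Int)) :
    ∀ (cells : List (Int × Int)) (vis : List (List Bool)),
    ds.foldl (stepB grid cx cy) (cells, vis) =
      (cells ++ (ds.foldl (stepB grid cx cy) ([], vis)).1,
       (ds.foldl (stepB grid cx cy) ([], vis)).2) := by
  induction ds with
  | nil => intro cells vis; simp
  | cons d ds ih =>
    intro cells vis
    rw [List.foldl_cons, List.foldl_cons]
    by_cases h : okCell grid vis (cx + d.1) (cy + d.2) = true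
    · rw [stepB_pos grid cx cy (cells, vis) d h, stepB_pos grid cx cy ([], vis) d h]
      rw [ih (cells ++ [(cx + d.1, cy + d.2)]), ih ([] ++ [(cx + d.1, cy + d.2)])]
      simp
    · rw [stepB_neg grid cx cy (cells, vis) d h, stepB_neg grid cx cy ([], vis) d h]
      exact ih cells vis

theorem foldB_measure (grid : List (List String)) (cx cy : Int) (ds : List (Int × Int)) :
    ∀ (cells : List (Int × Int)) (vis : List (List Bool)), VisShape grid vis →
    VisShape grid (ds.foldl (stepB grid cx cy) (cells, vis)).2 ∧
    2 * countFalse (ds.foldl (stepB grid cx cy) (cells, vis)).2 +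
        (ds.foldl (stepB grid cx cy) (cells, vis)).1.length ≤
      2 * countFalse vis + cells.length := by
  induction ds with
  | nil => intro cells vis hs; exact ⟨hs, le_refl _⟩
  | cons d ds ih =>
    intro cells vis hs
    rw [List.foldl_cons]
    by_cases h : okCell grid vis (cx + d.1) (cy + d.2) = true
    · rw [stepB_pos grid cx cy (cells, vis) d h]
      obtain ⟨hnx0, hnx, hny0, hny, hvf, -⟩ := (okCell_iff grid vis (cx + d.1) (cy + d.2)).mp h
      have hs' : VisShape grid (set2 vis (cx + d.1) (cy + d.2) true) :=
        shape_set2 grid vis _ _ hs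
      have hlen : (cx + d.1).toNat < vis.length := by
        have := hs.1; omega
      have hrow : (cy + d.2).toNat < (vis[(cx + d.1).toNat]).length := by
        have h2 := hs.2 (cx + d.1).toNat (by omega)
        rw [List.getElem?_eq_getElem hlen, Option.getD_some] at h2
        omega
      have hcf := cf_set2 vis (cx + d.1) (cy + d.2) hnx0 hlen hny0 hrow hvf
      obtain ⟨h1, h2⟩ := ih (cells ++ [(cx + d.1, cy + d.2)]) _ hs'
      refine ⟨h1, ?_⟩
      simp only [List.length_append, List.length_cons, List.length_nil] at h2 ⊢
      omega
    · rw [stepB_neg grid cx cy (cells, vis) d h]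
      exact ih cells vis hs

-- fold of stepA over one popped cell, phrased through stepB (same appends, same visited)
theorem foldAB (grid : List (List String)) (cx cy : Int) (ds : List (Int × Int)) :
    ∀ (q : List (Int × Int)) (vis : List (List Bool)) (C0 : List (Int × Int)),
    ds.foldl (stepA grid cx cy) (q, vis, C0 ++ q) =
      ((ds.foldl (stepB grid cx cy) (C0 ++ q, vis)).1.drop C0.length,
       (ds.foldl (stepB grid cx cy) (C0 ++ q, vis)).2,
       (ds.foldl (stepB grid cx cy) (C0 ++ q, vis)).1) := by
  induction ds with
  | nil => intro q vis C0; simp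
  | cons d ds ih =>
    intro q vis C0
    rw [List.foldl_cons, List.foldl_cons]
    by_cases h : okCell grid vis (cx + d.1) (cy + d.2) = true
    · rw [stepA_pos grid cx cy (q, vis, C0 ++ q) d h, stepB_pos grid cx cy (C0 ++ q, vis) d h]
      have hassoc : (C0 ++ q) ++ [(cx + d.1, cy + d.2)] = C0 ++ (q ++ [(cx + d.1, cy + d.2)]) :=
        List.append_assoc _ _ _
      simp only [hassoc]
      exact ih (q ++ [(cx + d.1, cy + d.2)]) (set2 vis (cx + d.1) (cy + d.2) true) C0
    · rw [stepA_neg grid cx cy (q, vis, C0 ++ q) d h, stepB_neg grid cx cy (C0 ++ q, vis) d h]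
      exact ih q vis C0

-- the level fold, shifted: accumulator prefix is inert
theorem levelFold_shift (grid : List (List String)) (ds : List (Int × Int)) (F : List (Int × Int)) :
    ∀ (acc : List (Int × Int)) (vis : List (List Bool)),
    levelFold grid ds F (acc, vis) =
      (acc ++ (levelFold grid ds F ([], vis)).1, (levelFold grid ds F ([], vis)).2) := by
  induction F with
  | nil => intro acc vis; simp [levelFold]
  | cons c F ih =>
    intro acc vis
    have hcons : ∀ st, levelFold grid ds (c :: F) st =
        levelFold grid ds F (ds.foldl (stepB grid c.1 c.2) st) := fun _ => rfl
    rw [hcons (acc, vis), hcons ([], vis)]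
    rw [foldB_shift grid c.1 c.2 ds acc vis, foldB_shift grid c.1 c.2 ds [] vis]
    simp only [List.nil_append]
    rw [ih (acc ++ (ds.foldl (stepB grid c.1 c.2) ([], vis)).1)
        (ds.foldl (stepB grid c.1 c.2) ([], vis)).2,
      ih (ds.foldl (stepB grid c.1 c.2) ([], vis)).1
        (ds.foldl (stepB grid c.1 c.2) ([], vis)).2]
    simp

theorem levelFold_measure (grid : List (List String)) (ds : List (Int × Int)) (F : List (Int × Int)) :
    ∀ (acc : List (Int × Int)) (vis : List (List Bool)), VisShape grid vis →
    VisShape grid (levelFold grid ds F (acc, vis)).2 ∧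
    2 * countFalse (levelFold grid ds F (acc, vis)).2 + (levelFold grid ds F (acc, vis)).1.length ≤
      2 * countFalse vis + acc.length := by
  induction F with
  | nil => intro acc vis hs; exact ⟨hs, le_refl _⟩
  | cons c F ih =>
    intro acc vis hs
    unfold levelFold
    rw [List.foldl_cons]
    obtain ⟨hs1, hm1⟩ := foldB_measure grid c.1 c.2 ds acc vis hs
    obtain ⟨hs2, hm2⟩ := ih (ds.foldl (stepB grid c.1 c.2) (acc, vis)).1
      (ds.foldl (stepB grid c.1 c.2) (acc, vis)).2 hs1
    refine ⟨by exact hs2, ?_⟩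
    calc 2 * countFalse (levelFold grid ds F ((ds.foldl (stepB grid c.1 c.2) (acc, vis)).1,
            (ds.foldl (stepB grid c.1 c.2) (acc, vis)).2)).2 +
          (levelFold grid ds F ((ds.foldl (stepB grid c.1 c.2) (acc, vis)).1,
            (ds.foldl (stepB grid c.1 c.2) (acc, vis)).2)).1.length
        ≤ 2 * countFalse (ds.foldl (stepB grid c.1 c.2) (acc, vis)).2 +
            (ds.foldl (stepB grid c.1 c.2) (acc, vis)).1.length := by
          simpa using hm2
      _ ≤ 2 * countFalse vis + acc.length := hm1

-- one whole level of A's queue loop equals one levelFold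
theorem levelA (grid : List (List String)) (ds : List (Int × Int)) (F : List (Int × Int)) :
    ∀ (N P : List (Int × Int)) (vis : List (List Bool)) (colors : PySem.Dict String Int) (f : Nat),
    bfsLoop grid ds (F.length + f) (F ++ N) vis ((P ++ F) ++ N) colors =
      bfsLoop grid ds f (N ++ (levelFold grid ds F ([], vis)).1)
        (levelFold grid ds F ([], vis)).2
        (((P ++ F) ++ N) ++ (levelFold grid ds F ([], vis)).1)
        (F.foldl (cnt grid) colors) := by
  induction F with
  | nil => intro N P vis colors f; simp [levelFold]
  | cons c F ih =>
    intro N P vis colors f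
    obtain ⟨cx, cy⟩ := c
    have hstep : ((cx, cy) :: F).length + f = (F.length + f) + 1 := by
      simp only [List.length_cons]; omega
    rw [hstep]
    show bfsLoop grid ds ((F.length + f) + 1) ((cx, cy) :: (F ++ N)) vis _ colors = _
    rw [bfsLoop]
    have hC : (P ++ (cx, cy) :: F) ++ N = (P ++ [(cx, cy)]) ++ (F ++ N) := by simp
    rw [hC, foldAB grid cx cy ds (F ++ N) vis (P ++ [(cx, cy)])]
    rw [foldB_shift grid cx cy ds ((P ++ [(cx, cy)]) ++ (F ++ N)) vis]
    set Δc := (ds.foldl (stepB grid cx cy) ([], vis)).1 with hΔc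
    set visc := (ds.foldl (stepB grid cx cy) ([], vis)).2 with hvisc
    have hdrop : (((P ++ [(cx, cy)]) ++ (F ++ N)) ++ Δc).drop (P ++ [(cx, cy)]).length
        = F ++ (N ++ Δc) := by
      rw [List.append_assoc, List.drop_left]; simp
    rw [hdrop]
    have hcells : ((P ++ [(cx, cy)]) ++ (F ++ N)) ++ Δc
        = ((P ++ [(cx, cy)]) ++ F) ++ (N ++ Δc) := by simp
    rw [show F ++ (N ++ Δc) = F ++ (N ++ Δc) from rfl, hcells]
    rw [ih (N ++ Δc) (P ++ [(cx, cy)]) visc (cnt grid colors (cx, cy)) f]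
    -- identify the level fold over (cx,cy) :: F
    have hLF : levelFold grid ds ((cx, cy) :: F) ([], vis)
        = (Δc ++ (levelFold grid ds F ([], visc)).1, (levelFold grid ds F ([], visc)).2) := by
      unfold levelFold
      rw [List.foldl_cons]
      rw [show ds.foldl (stepB grid (cx, cy).1 (cx, cy).2) ([], vis) = (Δc, visc) from by
        rw [hΔc, hvisc]]
      exact levelFold_shift grid ds F Δc visc
    rw [hLF]
    simp only [List.foldl_cons]
    congr 1 <;> simp
theorem levelLoop_mono (grid : List (List String)) (ds : List (Int × Int)) :
    ∀ (f : Nat) (F : List (Int × Int)) (vis : List (List Bool)) (C : List (Int × Int)),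
    ∃ Δ, levelLoop grid ds f F vis C = C ++ Δ := by
  intro f
  induction f with
  | zero => intro F vis C; exact ⟨[], by simp [levelLoop]⟩
  | succ f ih =>
    intro F vis C
    rw [levelLoop]
    by_cases h : F = []
    · rw [if_pos h]; exact ⟨[], by simp⟩
    · rw [if_neg h]
      obtain ⟨Δ, hΔ⟩ := ih (levelFold grid ds F ([], vis)).1 (levelFold grid ds F ([], vis)).2
        (C ++ (levelFold grid ds F ([], vis)).1)
      exact ⟨(levelFold grid ds F ([], vis)).1 ++ Δ, by rw [hΔ, List.append_assoc]⟩

-- the main correspondence: at a level boundary A's queue loop computes B's level loop's cells,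
-- and its colors are the cnt-fold over everything past the already-popped prefix
theorem mainLoop (grid : List (List String)) (ds : List (Int × Int)) :
    ∀ (fB : Nat) (F P : List (Int × Int)) (vis : List (List Bool))
      (colors : PySem.Dict String Int) (fA : Nat), VisShape grid vis →
    2 * countFalse vis + F.length + 1 ≤ fA →
    1 ≤ fB → (F ≠ [] → countFalse vis + 2 ≤ fB) →
    bfsLoop grid ds fA (F) vis (P ++ F) colors =
      (levelLoop grid ds fB F vis (P ++ F),
       ((levelLoop grid ds fB F vis (P ++ F)).drop P.length).foldl (cnt grid) colors) := by
  intro fB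
  induction fB with
  | zero => intro _ _ _ _ _ _ _ h1 _; omega
  | succ fB ih =>
    intro F P vis colors fA hs hfA _ hne
    by_cases hF : F = []
    · subst hF
      obtain ⟨fA', rfl⟩ : ∃ fA', fA = fA' + 1 := ⟨fA - 1, by omega⟩
      rw [bfsLoop, levelLoop, if_pos rfl]
      simp
    · have hcf2 : countFalse vis + 2 ≤ fB + 1 := hne hF
      obtain ⟨fA', hfA'⟩ : ∃ fA', fA = F.length + fA' := ⟨fA - F.length, by omega⟩
      subst hfA'
      have hlev := levelA grid ds F [] P vis colors fA'
      simp only [List.append_nil, List.nil_append] at hlev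
      rw [hlev]
      set Δ := (levelFold grid ds F ([], vis)).1 with hΔ
      set vis' := (levelFold grid ds F ([], vis)).2 with hvis'
      obtain ⟨hs', hm⟩ := levelFold_measure grid ds F [] vis hs
      rw [← hΔ, ← hvis'] at hm
      rw [← hvis'] at hs'
      simp only [List.length_nil] at hm
      have hrec := ih Δ (P ++ F) vis' (F.foldl (cnt grid) colors) fA' hs'
        (by omega)
        (by omega)
        (by intro hΔne
            have hΔ1 : 1 ≤ Δ.length := by
              cases hΔ' : Δ with
              | nil => exact absurd hΔ' hΔne
              | cons a l => simp
            omega)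
      rw [hrec]
      rw [levelLoop, if_neg hF, ← hΔ, ← hvis', List.append_assoc P F Δ]
      refine congrArg (Prod.mk _) ?_
      obtain ⟨Δ2, hΔ2⟩ := levelLoop_mono grid ds fB Δ vis' (P ++ (F ++ Δ))
      rw [hΔ2]
      rw [show (P ++ (F ++ Δ)) ++ Δ2 = (P ++ F) ++ (Δ ++ Δ2) from by simp,
        List.drop_left]
      rw [show (P ++ F) ++ (Δ ++ Δ2) = P ++ (F ++ (Δ ++ Δ2)) from by simp,
        List.drop_left]
      simp [List.foldl_append]

theorem cnt_fold (grid : List (List String)) (L : List (Int × Int)) : ∀ (i j : Int),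
    L.foldl (cnt grid) (PySem.Dict.mk [("A", i), ("B", j)]) =
      PySem.Dict.mk
        [("A", i + ((L.map (fun p => get2S grid p.1 p.2)).count "A" : Int)),
         ("B", j + ((L.map (fun p => get2S grid p.1 p.2)).count "B" : Int))] := by
  induction L with
  | nil => intro i j; simp
  | cons p L ih =>
    intro i j
    simp only [List.foldl_cons, List.map_cons, List.count_cons]
    by_cases hA : get2S grid p.1 p.2 = "A"
    · rw [show cnt grid (PySem.Dict.mk [("A", i), ("B", j)]) p =
          PySem.Dict.mk [("A", i + 1), ("B", j)] from by
        unfold cnt; rw [hA]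
        simp [PySem.Dict.contains, PySem.Dict.modify, PySem.Dict.insert, PySem.Dict.getD,
          PySem.Dict.get?]]
      rw [ih]
      simp [hA]
      omega
    · by_cases hB : get2S grid p.1 p.2 = "B"
      · rw [show cnt grid (PySem.Dict.mk [("A", i), ("B", j)]) p =
            PySem.Dict.mk [("A", i), ("B", j + 1)] from by
          unfold cnt; rw [hB]
          simp [PySem.Dict.contains, PySem.Dict.modify, PySem.Dict.insert, PySem.Dict.getD,
            PySem.Dict.get?]]
        rw [ih]
        simp [hB]
        omega
      · rw [show cnt grid (PySem.Dict.mk [("A", i), ("B", j)]) p =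
            PySem.Dict.mk [("A", i), ("B", j)] from by
          unfold cnt
          have hc : (PySem.Dict.mk [("A", i), ("B", j)]).contains (get2S grid p.1 p.2) = false := by
            simp [PySem.Dict.contains]
            exact ⟨fun h => hA h.symm, fun h => hB h.symm⟩
          rw [hc]
          simp]
        rw [ih]
        simp [hA, hB]

-- ===== VERDICT (by name: the statement is the Claim_ definition above) =====
theorem bfs_spec : Claim_equal_bfs := by
  intro x y grid visited directions _hdom hpre
  obtain ⟨h1, h2, -, -, -, -, -⟩ := hpre
  unfold Spec_bfs bfs bfs_alt
  have hshape : VisShape grid (set2 visited x y true) :=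
    shape_set2 grid visited x y ⟨h1, h2⟩
  have hmain := mainLoop grid directions (countFalse (set2 visited x y true) + 2)
    [(x, y)] [] (set2 visited x y true) (PySem.Dict.ofList [("A", 0), ("B", 0)])
    (2 * countFalse (set2 visited x y true) + 2) hshape (by simp) (by omega)
    (by intro _; omega)
  simp only [List.nil_append, List.length_nil, List.drop_zero] at hmain
  rw [hmain]
  rw [show PySem.Dict.ofList [("A", (0 : Int)), ("B", 0)] =
    PySem.Dict.mk [("A", 0), ("B", 0)] from rfl]
  rw [cnt_fold]
  congr 1
  simp only [PySem.Dict.getD_foldl_modify_add_one]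
  simp [PySem.Dict.getD, PySem.Dict.get?, PySem.Dict.empty]
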